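-- pv_equiv track=rewrite | github.com/pisitponjanton/IT-KMITL | PSCP-Y-1-(PYTHON)/Week14/ThermoDynamics.py | numm
-- ===== SOURCE A (Python) =====
-- def numm(n,s):
--     """numm"""
--     o=0
--     for i,_ in enumerate(n):
--         for j,_ in enumerate(n):
--             if abs(n[i]-n[j])>=2:
--                 s+=1
--                 o=1
--                 if n[i]>n[j]:
--                     n[i]-=1
--                     n[j]+=1
--                 else:
--                     n[i]+=1
--                     n[j]-=1
--                 break
--         if o:
--             break
--     return n,s
-- ===== SOURCE B (Python) =====
-- def numm(n, s):
--     # O(n): precompute min/max, locate the first index that can participate in a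
--     # >=2-difference pair, then one scan for its partner.  Mutates n in place like A.
--     if n:
--         mn = min(n)
--         mx = max(n)
--         if mx - mn >= 2:
--             i = next(k for k, v in enumerate(n) if v - mn >= 2 or mx - v >= 2)
--             j = next(k for k, v in enumerate(n) if abs(n[i] - v) >= 2)
--             if n[i] > n[j]:
--                 n[i] -= 1
--                 n[j] += 1
--             else:
--                 n[i] += 1
--                 n[j] -= 1
--             s += 1
--     return n, s
-- ===== Notes on version B (the rewrite author's own statement) =====
-- stated objective: faster
-- what changed: Replaces the O(n^2) nested index scan with an O(n) pass: min/max are precomputed, the first index able to join a >=2-difference pair is found by comparing each value against min/max, then one scan finds its partner.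
import Mathlib
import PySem

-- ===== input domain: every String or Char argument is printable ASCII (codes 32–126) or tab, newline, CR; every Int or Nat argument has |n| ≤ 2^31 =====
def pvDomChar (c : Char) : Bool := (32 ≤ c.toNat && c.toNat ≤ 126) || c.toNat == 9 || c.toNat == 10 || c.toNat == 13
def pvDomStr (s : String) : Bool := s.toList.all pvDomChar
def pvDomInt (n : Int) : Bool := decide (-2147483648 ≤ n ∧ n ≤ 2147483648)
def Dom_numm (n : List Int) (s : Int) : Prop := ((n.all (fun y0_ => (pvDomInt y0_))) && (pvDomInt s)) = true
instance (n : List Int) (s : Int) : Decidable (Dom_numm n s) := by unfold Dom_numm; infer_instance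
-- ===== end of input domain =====

-- B replaces A's O(n^2) nested index scan by an O(n) min/max precomputation plus two
-- linear scans (objective: faster, asymptotic). Equivalence is about the RETURN value
-- only: the Python A (and B) mutate the argument list in place.


-- ===== PORT A =====
-- the transfer done when the pair (i, j) is found
def nummXfer (n : List Int) (i j : Nat) : List Int :=
  let a := n.getD i 0
  let b := n.getD j 0
  if a > b then (n.set i (a - 1)).set j (b + 1) else (n.set i (a + 1)).set j (b - 1)

-- inner 'for j' loop: some (n', s') if the break fired, none if it ran out
-- (indices come from enumerate, so getD is exact: every access is in range)
def nummInner (n : List Int) (i : Nat) (s : Int) : List Nat → Option (List Int × Int)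
  | [] => none
  | j :: js =>
    if 2 ≤ ((n.getD i 0) - (n.getD j 0)).natAbs then some (nummXfer n i j, s + 1)
    else nummInner n i s js

-- outer 'for i' loop with the 'o' break flag folded into the early return
def nummOuter (n : List Int) (s : Int) : List Nat → List Int × Int
  | [] => (n, s)
  | i :: is =>
    match nummInner n i s (List.range n.length) with
    | some r => r
    | none => nummOuter n s is

def numm (n : List Int) (s : Int) : List Int × Int :=
  nummOuter n s (List.range n.length)

-- ===== PORT B =====
-- port of Source B's 'next(k for k, v in enumerate(n) if p v)' generator scan
def nummFirstIdx (p : Int → Bool) : List Int → Nat → Option Nat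
  | [], _ => none
  | x :: t, k => if p x then some k else nummFirstIdx p t (k + 1)

def numm_alt (n : List Int) (s : Int) : List Int × Int :=
  match PySem.List.min? n (fun x => x), PySem.List.max? n (fun x => x) with
  | some mn, some mx =>
    if 2 ≤ mx - mn then
      match nummFirstIdx (fun v => decide (2 ≤ v - mn) || decide (2 ≤ mx - v)) n 0 with
      | some i =>
        let a := n.getD i 0
        match nummFirstIdx (fun v => decide (2 ≤ (a - v).natAbs)) n 0 with
        | some j =>
          let b := n.getD j 0
          (if a > b then (n.set i (a - 1)).set j (b + 1) else (n.set i (a + 1)).set j (b - 1), s + 1)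
        | none => (n, s)  -- unreachable: a partner exists whenever mx - mn ≥ 2
      | none => (n, s)    -- unreachable likewise
    else (n, s)
  | _, _ => (n, s)        -- n = []

-- ===== PRECONDITION & SPEC =====
def Spec_numm (n : List Int) (s : Int) (out : List Int × Int) : Prop := out = numm_alt n s
instance (n : List Int) (s : Int) (out : List Int × Int) : Decidable (Spec_numm n s out) := by unfold Spec_numm; infer_instance

-- ===== CLAIM (what is proved, stated in full; the proofs are below) =====
def Claim_equal_numm : Prop := ∀ (n : List Int) (s : Int), Dom_numm n s → Spec_numm n s (numm n s)

-- ===== LEMMAS AND PROOFS =====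
-- 'nummHit n i j' : the break condition of A's inner loop
def nummHit (n : List Int) (i j : Nat) : Bool := decide (2 ≤ ((n.getD i 0) - (n.getD j 0)).natAbs)

theorem find?_congr_mem {α : Type} (l : List α) (p q : α → Bool)
    (h : ∀ x ∈ l, p x = q x) : l.find? p = l.find? q := by
  induction l with
  | nil => rfl
  | cons x t ih =>
    rw [List.find?_cons, List.find?_cons, h x List.mem_cons_self]
    split
    · rfl
    · exact ih fun y hy => h y (List.mem_cons_of_mem _ hy)

theorem nummInner_eq_find (n : List Int) (i : Nat) (s : Int) (js : List Nat) :
    nummInner n i s js = (js.find? (nummHit n i)).map (fun j => (nummXfer n i j, s + 1)) := by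
  induction js with
  | nil => rfl
  | cons j js ih =>
    rw [nummInner, List.find?_cons]
    by_cases h : 2 ≤ ((n.getD i 0) - (n.getD j 0)).natAbs
    · rw [if_pos h]
      have hh : nummHit n i j = true := by simpa [nummHit] using h
      rw [hh]; rfl
    · rw [if_neg h]
      have hh : nummHit n i j = false := by simpa [nummHit] using h
      rw [hh]; exact ih

theorem nummOuter_eq_find (n : List Int) (s : Int) (is : List Nat) :
    nummOuter n s is =
      match is.find? (fun i => ((List.range n.length).find? (nummHit n i)).isSome) with
      | some i =>
        match (List.range n.length).find? (nummHit n i) with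
        | some j => (nummXfer n i j, s + 1)
        | none => (n, s)
      | none => (n, s) := by
  induction is with
  | nil => rfl
  | cons i is ih =>
    rw [nummOuter, nummInner_eq_find, List.find?_cons]
    cases h : (List.range n.length).find? (nummHit n i) with
    | none => simpa [h] using ih
    | some j => simp [h]

theorem nummFirstIdx_eq_find (p : Int → Bool) (n : List Int) (k : Nat) :
    nummFirstIdx p n k =
      ((List.range n.length).find? (fun i => p (n.getD i 0))).map (fun i => i + k) := by
  induction n generalizing k with
  | nil => rfl
  | cons x t ih =>
    have hr : List.range (x :: t).length = 0 :: (List.range t.length).map Nat.succ := by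
      simpa using List.range_succ_eq_map (n := t.length)
    rw [nummFirstIdx, hr, List.find?_cons, List.getD_cons_zero]
    by_cases h : p x
    · rw [if_pos h, h]
      simp
    · rw [if_neg h, Bool.eq_false_iff.mpr h]
      dsimp only
      rw [List.find?_map, ih (k + 1),
        find?_congr_mem _ ((fun i => p ((x :: t).getD i 0)) ∘ Nat.succ)
          (fun i => p (t.getD i 0)) (fun a _ => by simp [Function.comp])]
      cases (List.range t.length).find? (fun i => p (t.getD i 0)) with
      | none => rfl
      | some j =>
        simp only [Option.map_some, Option.some.injEq]
        omega

-- pointwise: A's outer-loop condition 'some j differs from n[i] by ≥ 2' equals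
-- B's min/max test on n[i]
theorem hit_isSome_eq (n : List Int) (mn mx : Int)
    (hmn : ∀ y ∈ n, mn ≤ y) (hmx : ∀ y ∈ n, y ≤ mx)
    (hmem_mn : mn ∈ n) (hmem_mx : mx ∈ n) :
    ∀ i ∈ List.range n.length,
      (fun i => ((List.range n.length).find? (nummHit n i)).isSome) i
        = (fun i => (decide (2 ≤ n.getD i 0 - mn) || decide (2 ≤ mx - n.getD i 0))) i := by
  intro i _
  rw [Bool.eq_iff_iff]
  simp only [List.find?_isSome, List.mem_range, nummHit, decide_eq_true_eq, Bool.or_eq_true]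
  constructor
  · rintro ⟨j, hj, hhit⟩
    have hb : n.getD j 0 ∈ n := by
      rw [List.getD_eq_getElem _ _ (by simpa using hj)]
      exact List.getElem_mem _
    have h1 := hmn _ hb
    have h2 := hmx _ hb
    omega
  · intro h
    rcases h with h | h
    · obtain ⟨j, hj, hje⟩ := List.mem_iff_getElem.mp hmem_mn
      refine ⟨j, by simpa using hj, ?_⟩
      have hgj : n.getD j 0 = mn := by
        rw [List.getD_eq_getElem _ _ (by simpa using hj)]; exact hje
      rw [hgj]; omega
    · obtain ⟨j, hj, hje⟩ := List.mem_iff_getElem.mp hmem_mx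
      refine ⟨j, by simpa using hj, ?_⟩
      have hgj : n.getD j 0 = mx := by
        rw [List.getD_eq_getElem _ _ (by simpa using hj)]; exact hje
      rw [hgj]; omega

theorem numm_spec' : ∀ (n : List Int) (s : Int), numm n s = numm_alt n s := by
  intro n s
  cases hmin : PySem.List.min? n (fun x => x) with
  | none =>
    have hnil : n = [] := (PySem.List.min?_eq_none_iff _ _).mp hmin
    subst hnil
    rfl
  | some mn =>
    cases hmax : PySem.List.max? n (fun x => x) with
    | none =>
      have hnil : n = [] := (PySem.List.max?_eq_none_iff _ _).mp hmax
      subst hnil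
      simp [(PySem.List.min?_eq_none_iff ([] : List Int) (fun x => x)).mpr rfl] at hmin
    | some mx =>
      have hmn := PySem.List.min?_isMin hmin
      have hmx := PySem.List.max?_isMax hmax
      have hmem_mn := PySem.List.min?_mem hmin
      have hmem_mx := PySem.List.max?_mem hmax
      rw [numm, nummOuter_eq_find, numm_alt, hmin, hmax]
      dsimp only
      by_cases hd : 2 ≤ mx - mn
      · rw [if_pos hd]
        -- the two first-index scans coincide
        have hF : (List.range n.length).find? (fun i => ((List.range n.length).find? (nummHit n i)).isSome)
            = (List.range n.length).find? (fun i => (decide (2 ≤ n.getD i 0 - mn) || decide (2 ≤ mx - n.getD i 0))) :=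
          find?_congr_mem _ _ _ (hit_isSome_eq n mn mx hmn hmx hmem_mn hmem_mx)
        have hB1 : nummFirstIdx (fun v => decide (2 ≤ v - mn) || decide (2 ≤ mx - v)) n 0
            = (List.range n.length).find? (fun i => ((List.range n.length).find? (nummHit n i)).isSome) := by
          rw [nummFirstIdx_eq_find, hF]
          cases (List.range n.length).find? (fun i => (decide (2 ≤ n.getD i 0 - mn) || decide (2 ≤ mx - n.getD i 0))) <;> simp
        rw [hB1]
        cases hFi : (List.range n.length).find? (fun i => ((List.range n.length).find? (nummHit n i)).isSome) with
        | none => rfl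
        | some i =>
          have hB2 : nummFirstIdx (fun v => decide (2 ≤ (n.getD i 0 - v).natAbs)) n 0
              = (List.range n.length).find? (nummHit n i) := by
            rw [nummFirstIdx_eq_find]
            have : (fun j => decide (2 ≤ (n.getD i 0 - n.getD j 0).natAbs)) = nummHit n i := rfl
            rw [this]
            cases (List.range n.length).find? (nummHit n i) <;> simp
          simp only []
          rw [hB2]
          cases (List.range n.length).find? (nummHit n i) with
          | none => rfl
          | some j => rfl
      · rw [if_neg hd]
        have hnone : (List.range n.length).find? (fun i => ((List.range n.length).find? (nummHit n i)).isSome) = none := by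
          rw [find?_congr_mem _ _ _ (hit_isSome_eq n mn mx hmn hmx hmem_mn hmem_mx)]
          rw [List.find?_eq_none]
          intro i hi
          have hb : n.getD i 0 ∈ n := by
            rw [List.getD_eq_getElem _ _ (by simpa using hi)]
            exact List.getElem_mem _
          have h1 := hmn _ hb
          have h2 := hmx _ hb
          simp only [Bool.or_eq_true, decide_eq_true_eq, not_or]
          omega
        rw [hnone]

-- ===== VERDICT (by name: the statement is the Claim_ definition above) =====
theorem numm_spec : Claim_equal_numm := by
  intro n s _
  exact numm_spec' n s
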